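-- pv_equiv track=rewrite | github.com/AP-MI-2021/lab-3-emanuelaturdean | main.py | get_longest_concat_is_prime
-- ===== SOURCE A (Python) =====
-- import itertools
--
-- def is_prime(n):
--     if n > 1:
--         for i in range(2, int(n / 2) + 1):
--             if (n % i) == 0:
--                 return 0
--         return 1
--     else:
--         return 0
--
-- def concatenare(lista) -> int:
--     stringFinal = ""
--     for element in lista:
--         elementStr = str(element)
--         stringFinal = stringFinal + elementStr
--     if stringFinal != "":
--         return int(stringFinal)
--     return 0
--
-- def get_longest_concat_is_prime(lst: list[int]) -> list[int]:
--     listamaxima = []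
--     for L in range(0, len(lst) + 1):
--         for subset in itertools.combinations(lst, L):
--             if is_prime(concatenare(subset)):
--                 if len(subset) > len(listamaxima):
--                     listamaxima = subset
--     return listamaxima
-- ===== SOURCE B (Python) =====
-- def concatenare(lista) -> int:
--     stringFinal = ""
--     for element in lista:
--         elementStr = str(element)
--         stringFinal = stringFinal + elementStr
--     if stringFinal != "":
--         return int(stringFinal)
--     return 0
--
-- def _is_prime_sqrt(n):
--     # trial division by 2 then odd d with d*d <= n; agrees with A's is_prime
--     if n < 2:
--         return False
--     if n % 2 == 0:
--         return n == 2
--     d = 3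
--     while d * d <= n:
--         if n % d == 0:
--             return False
--         d += 2
--     return True
--
-- def _search(k, xs, prefix):
--     # first k-combination of xs (itertools order), glued after prefix, whose
--     # concatenation is prime; depth-first, include-first backtracking
--     if k == 0:
--         return prefix if _is_prime_sqrt(concatenare(prefix)) else None
--     if not xs:
--         return None
--     r = _search(k - 1, xs[1:], prefix + [xs[0]])
--     if r is not None:
--         return r
--     return _search(k, xs[1:], prefix)
--
-- def get_longest_concat_is_prime(lst: list[int]) -> list[int]:
--     # descending early-exit backtracking search instead of A's ascending
--     # enumerate-everything scan with a running maximum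
--     for L in range(len(lst), 0, -1):
--         r = _search(L, lst, [])
--         if r is not None:
--             return tuple(r)
--     return []
-- ===== Notes on version B (the rewrite author's own statement) =====
-- stated objective: alternative
-- what changed: B replaces A's ascending enumerate-all-combinations scan with a running maximum by a descending early-exit depth-first backtracking search over combinations, and replaces A's n/2-bounded trial division with a sqrt-bounded odd-step trial division.
import Mathlib
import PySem

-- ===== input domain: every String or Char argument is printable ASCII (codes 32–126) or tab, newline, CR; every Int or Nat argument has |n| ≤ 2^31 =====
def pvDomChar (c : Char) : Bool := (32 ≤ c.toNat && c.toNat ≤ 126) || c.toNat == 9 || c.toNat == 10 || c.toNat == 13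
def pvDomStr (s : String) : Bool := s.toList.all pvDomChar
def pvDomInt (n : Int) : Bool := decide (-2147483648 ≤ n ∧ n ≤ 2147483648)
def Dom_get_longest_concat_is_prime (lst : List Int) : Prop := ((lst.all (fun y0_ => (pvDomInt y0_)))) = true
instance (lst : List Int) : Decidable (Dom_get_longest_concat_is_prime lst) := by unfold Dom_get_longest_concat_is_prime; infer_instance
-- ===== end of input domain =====

-- B replaces A's ascending enumerate-all-combinations scan with a running maximum by a
-- descending early-exit backtracking search, with a sqrt-bounded trial-division prime
-- test in place of A's n/2-bounded one; same return value on all of Pre_.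

-- ===== PORT A =====
-- shared module helper concatenare (identical in Source A and Source B)
def py_concatenare (lista : List Int) : Int :=
  let stringFinal := lista.foldl (fun acc e => acc ++ PySem.Int.toStr e) ""
  if stringFinal ≠ "" then (PySem.Int.ofStr? stringFinal).getD 0 else 0

-- A's is_prime: 'for i in range(2, int(n/2)+1): if n % i == 0: return 0' / 'return 1'
def py_is_prime_loop (n i bound : Int) : Int :=
  if i < bound then
    if PySem.Int.mod n i = 0 then 0
    else py_is_prime_loop n (i + 1) bound
  else 1
termination_by (bound - i).toNat
decreasing_by omega

def py_is_prime (n : Int) : Int :=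
  if n > 1 then py_is_prime_loop n 2 (PySem.Int.floordiv n 2 + 1)
  else 0

-- itertools.combinations(xs, k) in itertools' order
def py_combinations : Nat → List Int → List (List Int)
  | 0, _ => [[]]
  | _ + 1, [] => []
  | k + 1, x :: xs =>
      (py_combinations k xs).map (fun c => x :: c) ++ py_combinations (k + 1) xs

def get_longest_concat_is_prime (lst : List Int) : List Int :=
  (PySem.List.pyRange 0 ((lst.length : Int) + 1) 1).foldl
    (fun listamaxima L =>
      (py_combinations L.toNat lst).foldl
        (fun m subset =>
          if py_is_prime (py_concatenare subset) ≠ 0 ∧ subset.length > m.length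
          then subset else m)
        listamaxima)
    []

-- ===== PORT B =====
-- B's _is_prime_sqrt: 'while d*d <= n: if n % d == 0: return False; d += 2'
def alt_prime_loop (n d : Int) : Bool :=
  if h : d * d ≤ n then
    if PySem.Int.mod n d = 0 then false else alt_prime_loop n (d + 2)
  else true
termination_by (n + 2 - d).toNat
decreasing_by
  have h1 : (0:Int) ≤ d * d := mul_self_nonneg d
  have h2 : 2 * d ≤ d * d + 1 := by nlinarith
  omega

def alt_is_prime (n : Int) : Bool :=
  if n < 2 then false
  else if PySem.Int.mod n 2 = 0 then n == 2
  else alt_prime_loop n 3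

-- B's _search: depth-first include-first backtracking over k-combinations
def altSearch : Nat → List Int → List Int → Option (List Int)
  | 0, _, pre => if alt_is_prime (py_concatenare pre) then some pre else none
  | _ + 1, [], _ => none
  | k + 1, x :: rest, pre =>
      match altSearch k rest (pre ++ [x]) with
      | some s => some s
      | none => altSearch (k + 1) rest pre

-- B's outer loop 'for L in range(len(lst), 0, -1)' with early return, else []
def altDescend (lst : List Int) : Nat → List Int
  | 0 => []
  | L + 1 =>
      match altSearch (L + 1) lst [] with
      | some s => s
      | none => altDescend lst L

def get_longest_concat_is_prime_alt (lst : List Int) : List Int :=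
  altDescend lst lst.length

-- ===== PRECONDITION & SPEC =====
-- Pre_ excludes exactly the inputs where Python A raises ValueError: a negative
-- element after the first position makes int() fail on a concatenation like "5-3"
-- (B raises the same error there).
def Pre_get_longest_concat_is_prime (lst : List Int) : Prop :=
  ∀ x ∈ lst.tail, 0 ≤ x
instance (lst : List Int) : Decidable (Pre_get_longest_concat_is_prime lst) := by
  unfold Pre_get_longest_concat_is_prime; infer_instance
def pvWitness_get_longest_concat_is_prime : List Int := [2, 3, 5]

def Spec_get_longest_concat_is_prime (lst : List Int) (out : List Int) : Prop := out = get_longest_concat_is_prime_alt lst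
instance (lst : List Int) (out : List Int) : Decidable (Spec_get_longest_concat_is_prime lst out) := by unfold Spec_get_longest_concat_is_prime; infer_instance

-- ===== CLAIM (what is proved, stated in full; the proofs are below) =====
def Claim_equal_get_longest_concat_is_prime : Prop := ∀ (lst : List Int), Dom_get_longest_concat_is_prime lst → Pre_get_longest_concat_is_prime lst → Spec_get_longest_concat_is_prime lst (get_longest_concat_is_prime lst)

-- ===== LEMMAS AND PROOFS =====

-- A's test as a predicate on subsets
def pvPred (s : List Int) : Bool := py_is_prime (py_concatenare s) != 0

-- characterisation of A's trial-division loop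
lemma loopA_ne_zero (n i b : Int) :
    py_is_prime_loop n i b ≠ 0 ↔ ∀ j, i ≤ j → j < b → PySem.Int.mod n j ≠ 0 := by
  induction i using py_is_prime_loop.induct (n := n) (bound := b) with
  | case1 i hlt hmod =>
      rw [py_is_prime_loop, if_pos hlt, if_pos hmod]
      simp only [ne_eq, not_true_eq_false, false_iff, not_forall]
      exact ⟨i, le_refl i, hlt, by simp [hmod]⟩
  | case2 i hlt hmod ih =>
      rw [py_is_prime_loop, if_pos hlt, if_neg hmod]
      rw [ih]
      constructor
      · intro h j hij hjb
        rcases eq_or_lt_of_le hij with rfl | hlt'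
        · exact hmod
        · exact h j (by omega) hjb
      · intro h j hij hjb
        exact h j (by omega) hjb
  | case3 i hlt =>
      rw [py_is_prime_loop, if_neg hlt]
      simp only [ne_eq, one_ne_zero, not_false_eq_true, true_iff]
      intro j hij hjb
      omega

-- characterisation of B's sqrt-bounded odd-step loop (for a nonnegative start)
lemma loopB_true (n d : Int) :
    0 ≤ d → (alt_prime_loop n d = true ↔
      ∀ j, d ≤ j → j * j ≤ n → 2 ∣ (j - d) → PySem.Int.mod n j ≠ 0) := by
  induction d using alt_prime_loop.induct (n := n) with
  | case1 d hle hmod =>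
      intro _
      rw [alt_prime_loop, dif_pos hle, if_pos hmod]
      simp only [Bool.false_eq_true, false_iff, not_forall]
      exact ⟨d, le_refl d, hle, by simp, by simp [hmod]⟩
  | case2 d hle hmod ih =>
      intro hd
      rw [alt_prime_loop, dif_pos hle, if_neg hmod]
      rw [ih (by omega)]
      constructor
      · intro h j hij hjj hpar
        rcases eq_or_lt_of_le hij with rfl | hlt'
        · exact hmod
        · exact h j (by omega) hjj (by omega)
      · intro h j hij hjj hpar
        exact h j (by omega) hjj (by omega)
  | case3 d hle =>
      intro hd
      rw [alt_prime_loop, dif_neg hle]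
      simp only [true_iff]
      intro j hij hjj _
      have : d * d ≤ j * j := mul_le_mul hij hij hd (by omega)
      omega

-- the two prime tests agree on every integer
lemma prime_eq (n : Int) : (py_is_prime n != 0) = alt_is_prime n := by
  rw [Bool.eq_iff_iff, bne_iff_ne]
  by_cases h1 : n ≤ 1
  · rw [py_is_prime, if_neg (by omega), alt_is_prime, if_pos (by omega)]
    simp
  · push_neg at h1
    have h2 : (2:Int) ≤ n := by omega
    rw [py_is_prime, if_pos (by omega), alt_is_prime, if_neg (by omega)]
    rw [loopA_ne_zero]
    have hfd : PySem.Int.floordiv n 2 = n / 2 := PySem.Int.floordiv_eq_ediv_of_pos (by norm_num)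
    rw [hfd]
    by_cases heven : PySem.Int.mod n 2 = 0
    · rw [if_pos heven]
      have hdvd2 : (2:Int) ∣ n := (PySem.Int.mod_eq_zero_iff_dvd n 2).mp heven
      by_cases hn2 : n = 2
      · subst hn2
        constructor
        · intro _; decide
        · intro _ j hj hjb
          norm_num at hjb
          omega
      · have h4 : (4:Int) ≤ n := by omega
        simp only [beq_iff_eq, hn2, iff_false, not_forall]
        refine ⟨2, le_refl 2, ?_, ?_⟩
        · have : (2:Int) ≤ n / 2 := by omega
          omega
        · simpa using hdvd2
    · rw [if_neg heven]
      have hodd : ¬ (2:Int) ∣ n := fun hd => heven ((PySem.Int.mod_eq_zero_iff_dvd n 2).mpr hd)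
      have hn3 : (3:Int) ≤ n := by omega
      rw [loopB_true n 3 (by norm_num)]
      constructor
      · -- A-condition → B-condition
        intro h j h3j hjj hpar hmod
        have hjdvd : j ∣ n := (PySem.Int.mod_eq_zero_iff_dvd n j).mp hmod
        obtain ⟨m, hm⟩ := hjdvd
        have hjm : j ≤ m := by nlinarith
        have h2j : j * 2 ≤ n := by nlinarith
        have hjle : j ≤ n / 2 := by omega
        exact h j (by omega) (by omega) hmod
      · -- B-condition → A-condition
        intro h j h2j hjb hmod
        have hjdvd : j ∣ n := (PySem.Int.mod_eq_zero_iff_dvd n j).mp hmod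
        have hjodd : ¬ (2:Int) ∣ j := fun hd => hodd (hd.trans hjdvd)
        have hj3 : (3:Int) ≤ j := by omega
        obtain ⟨m, hm⟩ := hjdvd
        have hjle : j ≤ n / 2 := by omega
        have h2jn : 2 * j ≤ n := by omega
        have hm2 : 2 ≤ m := by nlinarith
        have hmodd : ¬ (2:Int) ∣ m := by
          intro hd; exact hodd (by obtain ⟨t, ht⟩ := hd; exact ⟨j * t, by rw [hm, ht]; ring⟩)
        have hm3 : (3:Int) ≤ m := by omega
        by_cases hsq : j * j ≤ n
        · exact h j hj3 hsq (by omega) hmod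
        · have hmj : m ≤ j := by nlinarith
          have hmm : m * m ≤ n := by nlinarith
          have hmdvd : m ∣ n := ⟨j, by rw [hm]; ring⟩
          exact h m hm3 hmm (by omega)
            ((PySem.Int.mod_eq_zero_iff_dvd n m).mpr hmdvd)

-- B's backtracking search is find? over itertools' combination list
lemma search_eq : ∀ (xs : List Int) (k : Nat) (pre : List Int),
    altSearch k xs pre = ((py_combinations k xs).map (fun c => pre ++ c)).find? pvPred := by
  intro xs
  induction xs with
  | nil =>
      intro k pre
      cases k with
      | zero =>
          simp [altSearch, py_combinations, List.find?, pvPred, ← prime_eq]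
      | succ k => simp [altSearch, py_combinations]
  | cons x rest ih =>
      intro k pre
      cases k with
      | zero =>
          simp [altSearch, py_combinations, List.find?, pvPred, ← prime_eq]
      | succ k =>
          rw [altSearch]
          rw [py_combinations]
          rw [List.map_append, List.find?_append]
          have hmap : ((py_combinations k rest).map (fun c => x :: c)).map (fun c => pre ++ c)
              = (py_combinations k rest).map (fun c => (pre ++ [x]) ++ c) := by
            rw [List.map_map]; exact List.map_congr_left (fun c _ => by simp)
          rw [hmap, ← ih k (pre ++ [x]), ← ih (k + 1) pre]
          cases altSearch k rest (pre ++ [x]) <;> simp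

lemma combos_length : ∀ (xs : List Int) (k : Nat), ∀ s ∈ py_combinations k xs, s.length = k := by
  intro xs
  induction xs with
  | nil =>
      intro k s hs
      cases k
      · simp [py_combinations] at hs; simp [hs]
      · simp [py_combinations] at hs
  | cons x xs ih =>
      intro k s hs
      cases k with
      | zero => simp [py_combinations] at hs; simp [hs]
      | succ k =>
          simp [py_combinations] at hs
          rcases hs with ⟨c, hc, rfl⟩ | hs
          · simp [ih k c hc]
          · exact ih (k + 1) s hs

-- inner fold: with all candidates of length L, the max-tracking fold either keeps m
-- (when m is already at least as long) or takes the first prime candidate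
lemma inner_fold_eq (L : Nat) (cs : List (List Int)) (hlen : ∀ s ∈ cs, s.length = L)
    (m : List Int) :
    cs.foldl (fun m subset =>
        if py_is_prime (py_concatenare subset) ≠ 0 ∧ subset.length > m.length
        then subset else m) m
      = if m.length < L then (cs.find? pvPred).getD m else m := by
  induction cs generalizing m with
  | nil => simp
  | cons s cs ih =>
      have hsL : s.length = L := hlen s (by simp)
      have hlen' : ∀ t ∈ cs, t.length = L := fun t ht => hlen t (by simp [ht])
      by_cases hm : m.length < L
      · by_cases hp : pvPred s
        · have hcond : py_is_prime (py_concatenare s) ≠ 0 ∧ s.length > m.length := by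
            refine ⟨?_, by omega⟩
            simpa [pvPred] using hp
          simp only [List.foldl_cons, if_pos hcond]
          rw [ih hlen' s]
          simp [hsL, List.find?, hp, hm]
        · have hcond : ¬ (py_is_prime (py_concatenare s) ≠ 0 ∧ s.length > m.length) := by
            intro h
            exact absurd (by simpa [pvPred] using h.1) hp
          simp only [List.foldl_cons, if_neg hcond]
          rw [ih hlen' m]
          simp [List.find?, hp, hm]
      · have hcond : ¬ (py_is_prime (py_concatenare s) ≠ 0 ∧ s.length > m.length) := by
          intro h; omega
        simp only [List.foldl_cons, if_neg hcond]
        rw [ih hlen' m]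
        simp [hm]

-- A-side descending characterisation (proof-side helper)
def loopA (lst : List Int) : Nat → List Int
  | 0 =>
      match (py_combinations 0 lst).find? pvPred with
      | some s => s
      | none => []
  | L + 1 =>
      match (py_combinations (L + 1) lst).find? pvPred with
      | some s => s
      | none => loopA lst L

lemma loopA_length_le (lst : List Int) : ∀ j, (loopA lst j).length ≤ j := by
  intro j
  induction j with
  | zero =>
      simp only [loopA]
      cases hf : (py_combinations 0 lst).find? pvPred with
      | none => simp
      | some s =>
          have hmem := List.mem_of_find?_eq_some hf
          simp [combos_length lst 0 s hmem]
  | succ j ih =>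
      simp only [loopA]
      cases hf : (py_combinations (j+1) lst).find? pvPred with
      | none => simpa using Nat.le_succ_of_le ih
      | some s =>
          have hmem := List.mem_of_find?_eq_some hf
          simp [combos_length lst (j+1) s hmem]

-- A's outer fold up to j equals the descending characterisation from j
lemma outer_fold_eq (lst : List Int) : ∀ j : Nat,
    (PySem.List.pyRange 0 ((j : Int) + 1) 1).foldl
      (fun listamaxima L =>
        (py_combinations L.toNat lst).foldl
          (fun m subset =>
            if py_is_prime (py_concatenare subset) ≠ 0 ∧ subset.length > m.length
            then subset else m)
          listamaxima)
      []
    = loopA lst j := by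
  intro j
  induction j with
  | zero =>
      push_cast
      rw [PySem.List.pyRange_one_cons (by norm_num), PySem.List.pyRange_one_eq_nil (by norm_num)]
      simp only [List.foldl_cons, List.foldl_nil, Int.toNat_zero]
      rw [inner_fold_eq 0 _ (combos_length lst 0) []]
      simp [loopA, py_combinations, List.find?, pvPred, py_concatenare, py_is_prime]
  | succ j ih =>
      have hsplit : PySem.List.pyRange 0 ((j:Int) + 1 + 1) 1
          = PySem.List.pyRange 0 ((j:Int) + 1) 1 ++ [(j:Int) + 1] := by
        exact PySem.List.pyRange_one_succ_right (by positivity)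
      push_cast
      rw [show ((j:Int) + 1 + 1) = ((j:Int) + 1) + 1 from rfl, hsplit, List.foldl_append]
      push_cast at ih
      rw [ih]
      simp only [List.foldl_cons, List.foldl_nil]
      have htn : ((j:Int) + 1).toNat = j + 1 := by omega
      rw [htn, inner_fold_eq (j+1) _ (combos_length lst (j+1)) (loopA lst j)]
      have hlt : (loopA lst j).length < j + 1 :=
        Nat.lt_succ_of_le (loopA_length_le lst j)
      rw [if_pos hlt]
      conv_rhs => rw [loopA]
      cases hf : (py_combinations (j+1) lst).find? pvPred with
      | none => simp
      | some s => simp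

-- the descending characterisation is exactly B's descending search
lemma loopA_eq_altDescend (lst : List Int) : ∀ j, loopA lst j = altDescend lst j := by
  intro j
  induction j with
  | zero =>
      simp [loopA, altDescend, py_combinations, List.find?, pvPred, py_concatenare, py_is_prime]
  | succ j ih =>
      rw [loopA, altDescend]
      have hs : altSearch (j + 1) lst [] = (py_combinations (j + 1) lst).find? pvPred := by
        rw [search_eq lst (j + 1) []]
        congr 1
        simp
      rw [hs, ih]

-- ===== VERDICT (by name: the statement is the Claim_ definition above) =====
theorem get_longest_concat_is_prime_spec : Claim_equal_get_longest_concat_is_prime := by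
  intro lst _ _
  show get_longest_concat_is_prime lst = get_longest_concat_is_prime_alt lst
  unfold get_longest_concat_is_prime get_longest_concat_is_prime_alt
  rw [outer_fold_eq lst lst.length, loopA_eq_altDescend]
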